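-- pv_equiv track=rewrite | github.com/manwar/perlweeklychallenge-club | challenge-271/lubos-kolouch/python/ch-1.py | maximum_ones
-- ===== SOURCE A (Python) =====
-- from collections.abc import Sequence
--
-- def maximum_ones(matrix: Sequence[Sequence[int]]) -> int:
--     """Return 1-based index of row with maximum ones (ties -> smallest index)."""
--     if not matrix:
--         raise ValueError("Expected a non-empty matrix")
--
--     best_row = 1
--     best_count = -1
--     for i, row in enumerate(matrix, start=1):
--         count = sum(row)
--         if count > best_count:
--             best_count = count
--             best_row = i
--     return best_row
-- ===== SOURCE B (Python) =====
-- def maximum_ones(matrix):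
--     """Return 1-based index of row with maximum ones (ties -> smallest index)."""
--     if not matrix:
--         raise ValueError("Expected a non-empty matrix")
--     counts = [sum(row) for row in matrix]
--     return counts.index(max(counts)) + 1
-- ===== Notes on version B (the rewrite author's own statement) =====
-- stated objective: simpler
-- what changed: Replaces the single-pass running-maximum loop over (best_row, best_count) state by a two-phase decomposition: materialise the per-row sums, then return counts.index(max(counts)) + 1.
-- outside the precondition, e.g. on maximum_ones([[-2], [-1]]): A returns 1, B returns 2
import Mathlib
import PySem

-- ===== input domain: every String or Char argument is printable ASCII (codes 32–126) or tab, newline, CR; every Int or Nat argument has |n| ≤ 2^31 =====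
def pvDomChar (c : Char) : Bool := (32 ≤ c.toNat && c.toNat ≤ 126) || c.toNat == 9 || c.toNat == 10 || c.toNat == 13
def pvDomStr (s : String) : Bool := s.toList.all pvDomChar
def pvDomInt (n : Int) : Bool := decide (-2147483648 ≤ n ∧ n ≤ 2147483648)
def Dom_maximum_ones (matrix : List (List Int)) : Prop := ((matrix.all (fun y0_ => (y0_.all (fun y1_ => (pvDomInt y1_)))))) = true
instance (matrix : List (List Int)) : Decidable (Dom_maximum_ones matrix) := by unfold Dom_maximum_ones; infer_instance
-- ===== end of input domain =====

-- B replaces A's running-maximum loop by build-the-sums-table then index(max)+1: a simpler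
-- two-phase decomposition at the same cost; equal to A on every input Pre_ admits.

-- ===== PORT A =====
-- Literal port of A: running (index, best_row, best_count) loop, best_count starts at -1.
def maximum_ones (matrix : List (List Int)) : Int :=
  if matrix = [] then 0  -- Python raises ValueError here; excluded by Pre_maximum_ones
  else
    (matrix.foldl
      (fun (st : Int × Int × Int) row =>
        let count := row.foldl (· + ·) 0
        if count > st.2.2 then (st.1 + 1, st.1, count)
        else (st.1 + 1, st.2.1, st.2.2))
      (1, 1, -1)).2.1

-- ===== PORT B =====
-- Literal port of B: counts = [sum(row) for row in matrix]; counts.index(max(counts)) + 1.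
def maximum_ones_alt (matrix : List (List Int)) : Int :=
  if matrix = [] then 0  -- Python raises ValueError here; excluded by Pre_maximum_ones
  else
    let counts := matrix.map (fun row => row.foldl (· + ·) 0)
    match PySem.List.max? counts (fun y => y) with
    | none => 0
    | some m =>
      match PySem.List.index? counts m with
      | none => 0
      | some i => (i : Int) + 1

-- ===== PRECONDITION & SPEC =====
def pvRowSum (row : List Int) : Int := row.foldl (· + ·) 0

-- Pre_ excludes (a) the empty matrix, on which both Pythons raise ValueError, and (b) matrices in
-- which every row sum is negative and the first row's sum is not maximal — inputs impossible for the
-- 0/1 matrices this ones-counting function is specified on, where A (whose scan starts from best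
-- count -1) returns row 1 while B returns the first maximal-sum row: on this unspecified corner
-- either answer is defensible, so neither is claimed.
def Pre_maximum_ones (matrix : List (List Int)) : Prop :=
  matrix ≠ [] ∧ ¬ ((∀ r ∈ matrix, pvRowSum r < 0) ∧ ∃ r ∈ matrix, pvRowSum matrix.headI < pvRowSum r)
instance (matrix : List (List Int)) : Decidable (Pre_maximum_ones matrix) := by unfold Pre_maximum_ones; infer_instance
def pvWitness_maximum_ones : List (List Int) := [[0, 1], [1, 1]]

def Spec_maximum_ones (matrix : List (List Int)) (out : Int) : Prop := out = maximum_ones_alt matrix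
instance (matrix : List (List Int)) (out : Int) : Decidable (Spec_maximum_ones matrix out) := by unfold Spec_maximum_ones; infer_instance

-- ===== CLAIM (what is proved, stated in full; the proofs are below) =====
def Claim_equal_maximum_ones : Prop := ∀ (matrix : List (List Int)), Dom_maximum_ones matrix → Pre_maximum_ones matrix → Spec_maximum_ones matrix (maximum_ones matrix)

-- ===== LEMMAS AND PROOFS =====


-- index (0-based) of the first maximal element of a list
def pvAm : List Int → Nat
  | [] => 0
  | c :: rest => if rest.all (· ≤ c) then 0 else 1 + pvAm rest

theorem pvAm_cons (c : Int) (rest : List Int) :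
    pvAm (c :: rest) = if rest.all (· ≤ c) then 0 else 1 + pvAm rest := rfl

theorem pvFoldl_max_all_le (l : List Int) (a : Int) (h : ∀ e ∈ l, e ≤ a) :
    l.foldl max a = a := by
  induction l generalizing a with
  | nil => rfl
  | cons c t ih =>
      have hc : c ≤ a := h c (by simp)
      have hm : max a c = a := by omega
      simp only [List.foldl_cons, hm]
      exact ih a (fun e he => h e (by simp [he]))

theorem pvFoldl_max_cons (a b : Int) (l : List Int) :
    l.foldl max (max a b) = max a (l.foldl max b) := by
  induction l generalizing b with
  | nil => rfl
  | cons c t ih =>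
      simp only [List.foldl_cons, max_assoc]
      exact ih (max b c)

theorem pvIndex_max (c : Int) (rest : List Int) :
    PySem.List.index? (c :: rest) (rest.foldl max c) = some (pvAm (c :: rest)) := by
  induction rest generalizing c with
  | nil =>
      simp [pvAm, PySem.List.index?_cons_self]
  | cons d t ih =>
      by_cases hall : ∀ e ∈ d :: t, e ≤ c
      · have hM : (d :: t).foldl max c = c := pvFoldl_max_all_le _ _ hall
        have hall' : ((d :: t).all (· ≤ c)) = true := by
          simp only [List.all_eq_true, decide_eq_true_eq]; exact hall
        have ham : pvAm (c :: d :: t) = 0 := by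
          rw [pvAm_cons, if_pos hall']
        rw [hM, PySem.List.index?_cons_self, ham]
      · push_neg at hall
        obtain ⟨e, he, hce⟩ := hall
        have hbound := PySem.List.le_foldl_max t d
        have heM : e ≤ t.foldl max d := by
          rcases List.mem_cons.mp he with rfl | he'
          · exact hbound.1
          · exact hbound.2 e he'
        have hcM : c < t.foldl max d := lt_of_lt_of_le hce heM
        have hM : (d :: t).foldl max c = t.foldl max d := by
          have h1 : (d :: t).foldl max c = max c (t.foldl max d) := by
            simp only [List.foldl_cons]
            exact pvFoldl_max_cons c d t
          rw [h1]; omega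
        have hcond : ((d :: t).all (· ≤ c)) = false := by
          rw [List.all_eq_false]
          exact ⟨e, he, by simpa using (by omega : ¬ e ≤ c)⟩
        have ham : pvAm (c :: d :: t) = 1 + pvAm (d :: t) := by
          rw [pvAm_cons, if_neg (by simp [hcond])]
        rw [hM, PySem.List.index?_cons_of_ne, ih d, ham]
        · simp [Nat.add_comm]
        · omega

theorem pvRun_eq (cs : List Int) : ∀ (i br bc : Int),
    (cs.foldl
      (fun (st : Int × Int × Int) c =>
        if c > st.2.2 then (st.1 + 1, st.1, c) else (st.1 + 1, st.2.1, st.2.2))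
      (i, br, bc)).2.1
    = if cs.any (fun c => bc < c) then i + (pvAm cs : Int) else br := by
  induction cs with
  | nil => intro i br bc; simp
  | cons c rest ih =>
      intro i br bc
      by_cases hc : bc < c
      · simp only [List.foldl_cons, if_pos (show c > bc from hc)]
        rw [ih (i + 1) i c]
        have h2 : ((c :: rest).any fun e => decide (bc < e)) = true := by
          simp only [List.any_cons]; simp [hc]
        by_cases hall : ∀ e ∈ rest, e ≤ c
        · have h1 : (rest.any fun e => decide (c < e)) = false := by
            rw [List.any_eq_false]
            intro e he
            simpa using not_lt.mpr (hall e he)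
          have h3 : pvAm (c :: rest) = 0 := by
            rw [pvAm_cons, if_pos (by simp only [List.all_eq_true, decide_eq_true_eq]; exact hall)]
          rw [h1, h2, h3]
          simp
        · push_neg at hall
          obtain ⟨e, he, hce⟩ := hall
          have h1 : (rest.any fun e => decide (c < e)) = true := by
            simp only [List.any_eq_true, decide_eq_true_eq]
            exact ⟨e, he, hce⟩
          have h3 : pvAm (c :: rest) = 1 + pvAm rest := by
            rw [pvAm_cons, if_neg (by simp only [List.all_eq_true, decide_eq_true_eq]; push_neg; exact ⟨e, he, hce⟩)]
          rw [h1, h2, h3]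
          simp only [if_true, if_pos rfl]
          push_cast
          ring
      · simp only [List.foldl_cons, if_neg (show ¬ c > bc from hc)]
        rw [ih (i + 1) br bc]
        have hcs : ((c :: rest).any fun e => decide (bc < e)) = (rest.any fun e => decide (bc < e)) := by
          simp only [List.any_cons]
          simp [hc]
        by_cases hr : (rest.any fun e => decide (bc < e)) = true
        · obtain ⟨e, he, hbe⟩ := by
            simpa only [List.any_eq_true, decide_eq_true_eq] using hr
          have h3 : pvAm (c :: rest) = 1 + pvAm rest := by
            rw [pvAm_cons, if_neg (by simp only [List.all_eq_true, decide_eq_true_eq]; push_neg; exact ⟨e, he, by omega⟩)]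
          rw [hr, hcs, hr, h3]
          simp only [if_pos rfl]
          push_cast
          ring
        · simp only [Bool.not_eq_true] at hr
          rw [hcs, hr]
          simp

-- B on a nonempty matrix returns pvAm of the sums list, plus one.
theorem pvAlt_eq (r : List Int) (rs : List (List Int)) :
    maximum_ones_alt (r :: rs) = (pvAm ((r :: rs).map pvRowSum) : Int) + 1 := by
  unfold maximum_ones_alt
  simp only [if_neg (List.cons_ne_nil r rs)]
  have hmap : (r :: rs).map (fun row => row.foldl (· + ·) 0) = pvRowSum r :: rs.map pvRowSum := by
    simp [pvRowSum]
  rw [hmap, PySem.List.max?_id_cons]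
  simp only [pvIndex_max]
  simp [pvRowSum]

-- A on a nonempty matrix is the sentinel loop over the sums list.
theorem pvA_eq (r : List Int) (rs : List (List Int)) :
    maximum_ones (r :: rs)
    = if ((r :: rs).map pvRowSum).any (fun c => -1 < c) then 1 + (pvAm ((r :: rs).map pvRowSum) : Int) else 1 := by
  unfold maximum_ones
  simp only [if_neg (List.cons_ne_nil r rs)]
  have hfold : (r :: rs).foldl
      (fun (st : Int × Int × Int) row =>
        let count := row.foldl (· + ·) 0
        if count > st.2.2 then (st.1 + 1, st.1, count)
        else (st.1 + 1, st.2.1, st.2.2))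
      (1, 1, -1)
    = ((r :: rs).map pvRowSum).foldl
      (fun (st : Int × Int × Int) c =>
        if c > st.2.2 then (st.1 + 1, st.1, c) else (st.1 + 1, st.2.1, st.2.2))
      (1, 1, -1) := by
    rw [List.foldl_map]
    rfl
  rw [hfold, pvRun_eq]


-- ===== VERDICT (by name: the statement is the Claim_ definition above) =====
theorem maximum_ones_spec : Claim_equal_maximum_ones := by
  unfold Claim_equal_maximum_ones
  intro matrix _ hpre
  obtain ⟨hne, hnd⟩ := hpre
  match matrix, hne with
  | r :: rs, _ =>
    show maximum_ones (r :: rs) = maximum_ones_alt (r :: rs)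
    rw [pvA_eq, pvAlt_eq]
    by_cases hany : (((r :: rs).map pvRowSum).any fun c => decide (-1 < c)) = true
    · rw [if_pos hany]; ring
    · rw [if_neg hany]
      have hneg : ∀ q ∈ r :: rs, pvRowSum q < 0 := by
        intro q hq
        simp only [Bool.not_eq_true, List.any_eq_false, decide_eq_true_eq] at hany
        have := hany (pvRowSum q) (List.mem_map_of_mem hq)
        simp only [decide_eq_true_eq] at this
        omega
      have hmax : ∀ q ∈ r :: rs, pvRowSum q ≤ pvRowSum r := by
        push_neg at hnd
        intro q hq
        have := hnd hneg q hq
        simpa using this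
      have ham : pvAm ((r :: rs).map pvRowSum) = 0 := by
        have hall : ((rs.map pvRowSum).all (· ≤ pvRowSum r)) = true := by
          simp only [List.all_eq_true, decide_eq_true_eq]
          intro c hc
          obtain ⟨q, hq, rfl⟩ := List.mem_map.mp hc
          exact hmax q (by simp [hq])
        simp only [List.map_cons]
        rw [pvAm_cons, if_pos hall]
      rw [ham]
      simp
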